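-- pv_equiv track=rewrite | github.com/dtpaltz/Python-Practice | Interview-Questions/NumCoins.py | num_coins
-- ===== SOURCE A (Python) =====
-- def num_coins(cents):
--     coins = [25, 10, 5, 1]
--     if cents < min(coins):
--         return 0
--     total_count = 0
--     for c in coins:
--         total_count += cents // c
--         cents %= c
--     return total_count
-- ===== SOURCE B (Python) =====
-- # Residue-table method: one division by 25, then a precomputed 25-entry
-- # lookup table gives the coin count for the remainder (dimes+nickels+pennies).
-- _COINS_FOR_RESIDUE = [0, 1, 2, 3, 4, 1, 2, 3, 4, 5, 1, 2, 3, 4, 5, 2, 3, 4, 5, 6, 2, 3, 4, 5, 6]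
--
-- def num_coins(cents):
--     if cents < 1:
--         return 0
--     return cents // 25 + _COINS_FOR_RESIDUE[cents % 25]
-- ===== Notes on version B (the rewrite author's own statement) =====
-- stated objective: alternative
-- what changed: Replaces the greedy div/mod loop over the coin list by a single division by 25 plus a precomputed 25-entry lookup table mapping each residue (0..24) to the number of dimes/nickels/pennies it needs.
import Mathlib
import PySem

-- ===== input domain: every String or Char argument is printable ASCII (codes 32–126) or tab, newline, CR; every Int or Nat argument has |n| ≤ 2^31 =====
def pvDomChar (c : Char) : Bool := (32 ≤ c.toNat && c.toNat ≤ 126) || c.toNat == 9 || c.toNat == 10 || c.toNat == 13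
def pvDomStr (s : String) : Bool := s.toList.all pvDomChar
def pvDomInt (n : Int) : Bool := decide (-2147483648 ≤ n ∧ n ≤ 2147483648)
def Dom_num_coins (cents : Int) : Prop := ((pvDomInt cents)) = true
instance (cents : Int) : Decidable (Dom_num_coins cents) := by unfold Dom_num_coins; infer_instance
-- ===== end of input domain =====

-- B replaces A's greedy div/mod loop by one division by 25 plus a 25-entry residue lookup table (objective: alternative).


-- ===== PORT A =====
-- Literal port of A: min(coins) via PySem.List.min?, then fold over coins with (total, cents) state.
def num_coins (cents : Int) : Int :=
  let coins : List Int := [25, 10, 5, 1]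
  match PySem.List.min? coins (fun x => x) with
  | none => 0  -- unreachable: coins is a nonempty literal (Python min would raise only on [])
  | some m =>
    if cents < m then 0
    else
      let st := coins.foldl
        (fun (st : Int × Int) c => (st.1 + PySem.Int.floordiv st.2 c, PySem.Int.mod st.2 c))
        (0, cents)
      st.1

-- ===== PORT B =====
-- Port of B: one division by 25 and a residue lookup table. The index cents % 25
-- lies in [0,25) (positive divisor), so Python's TABLE[...] never raises; pyGetD is exact here.
def coinsForResidue : List Int := [0, 1, 2, 3, 4, 1, 2, 3, 4, 5, 1, 2, 3, 4, 5, 2, 3, 4, 5, 6, 2, 3, 4, 5, 6]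

def num_coins_alt (cents : Int) : Int :=
  if cents < 1 then 0
  else PySem.Int.floordiv cents 25 +
    PySem.List.pyGetD coinsForResidue (PySem.Int.mod cents 25) 0

-- ===== PRECONDITION & SPEC =====
def Spec_num_coins (cents : Int) (out : Int) : Prop := out = num_coins_alt cents
instance (cents : Int) (out : Int) : Decidable (Spec_num_coins cents out) := by unfold Spec_num_coins; infer_instance

-- ===== CLAIM =====
def Claim_equal_num_coins : Prop := ∀ (cents : Int), Dom_num_coins cents → Spec_num_coins cents (num_coins cents)

-- ===== LEMMAS AND PROOFS =====

-- The table entry for each residue r ∈ [0,25) equals the dimes+nickels+pennies the greedy loop spends on it.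
theorem table_eq_greedy (r : Int) (h0 : 0 ≤ r) (h1 : r < 25) :
    PySem.List.pyGetD coinsForResidue r 0 = r / 10 + r % 10 / 5 + r % 10 % 5 := by
  interval_cases r <;> decide

-- ===== VERDICT =====
theorem num_coins_spec : Claim_equal_num_coins := by
  intro cents _
  unfold Spec_num_coins num_coins num_coins_alt
  by_cases h : cents < 1
  · simp [PySem.List.min?, h]
  · simp only [PySem.List.min?, List.foldl]
    norm_num [h]
    rw [table_eq_greedy (cents % 25) (by omega) (by omega)]
    omega
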